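-- pv_equiv track=rewrite | github.com/dwikygilang/automatic-frame-checker | main.py | summarize_missing_blocks
-- ===== SOURCE A (Python) =====
-- def summarize_missing_blocks(missing):
--     if not missing: return []
--     blocks = []
--     start = prev = missing[0]
--     for n in missing[1:]:
--         if n == prev + 1:
--             prev = n
--         else:
--             blocks.append(str(start) if start == prev else f"{start}-{prev}")
--             start = prev = n
--     blocks.append(str(start) if start == prev else f"{start}-{prev}")
--     return blocks
-- ===== SOURCE B (Python) =====
-- def summarize_missing_blocks(missing):
--     if not missing:
--         return []
--     # break pairs: adjacent (x, y) where y does not continue x's run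
--     breaks = [(x, y) for x, y in zip(missing, missing[1:]) if y != x + 1]
--     # run starts: the first element, then every value right of a break
--     starts = [missing[0]] + [y for _, y in breaks]
--     # run ends: every value left of a break, then the last element
--     ends = [x for x, _ in breaks] + [missing[-1]]
--     return [str(a) if a == b else f"{a}-{b}" for a, b in zip(starts, ends)]
-- ===== Notes on version B (the rewrite author's own statement) =====
-- stated objective: simpler
-- what changed: Replaces A's single stateful scan (start/prev accumulator with flush-on-break) by a stateless staged decomposition: one zip pass collects the break pairs, run starts and run ends are read off the breaks as two comprehensions, and a final zip formats them.
import Mathlib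
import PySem

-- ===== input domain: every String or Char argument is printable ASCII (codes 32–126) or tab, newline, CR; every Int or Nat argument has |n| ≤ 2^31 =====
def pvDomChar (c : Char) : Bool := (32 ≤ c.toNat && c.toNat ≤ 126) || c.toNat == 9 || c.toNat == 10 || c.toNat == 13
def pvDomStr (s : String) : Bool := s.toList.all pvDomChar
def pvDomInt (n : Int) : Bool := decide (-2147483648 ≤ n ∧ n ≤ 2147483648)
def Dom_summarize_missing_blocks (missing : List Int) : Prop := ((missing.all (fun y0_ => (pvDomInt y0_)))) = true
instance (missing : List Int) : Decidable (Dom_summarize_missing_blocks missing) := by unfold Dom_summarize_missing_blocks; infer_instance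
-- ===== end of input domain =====

-- B replaces A's stateful start/prev scan by a stateless staged decomposition
-- (zip out the break pairs, read run starts and ends off them, zip-format);
-- simpler, same O(n) cost.

-- ===== PORT A =====
-- loop body of A's for-loop; state = (blocks, start, prev)
def pvStepA (st : List String × Int × Int) (n : Int) : List String × Int × Int :=
  if n == st.2.2 + 1 then (st.1, st.2.1, n)
  else (st.1 ++ [if st.2.1 == st.2.2 then PySem.Int.toStr st.2.1
                 else PySem.Int.toStr st.2.1 ++ "-" ++ PySem.Int.toStr st.2.2], n, n)

def summarize_missing_blocks (missing : List Int) : List String :=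
  match missing with
  | [] => []
  | m :: rest =>
    let r := rest.foldl pvStepA ([], m, m)
    r.1 ++ [if r.2.1 == r.2.2 then PySem.Int.toStr r.2.1
            else PySem.Int.toStr r.2.1 ++ "-" ++ PySem.Int.toStr r.2.2]

-- ===== PORT B =====
-- str(a) if a == b else f"{a}-{b}"
def pvFmt (a b : Int) : String :=
  if a == b then PySem.Int.toStr a else PySem.Int.toStr a ++ "-" ++ PySem.Int.toStr b

def summarize_missing_blocks_alt (missing : List Int) : List String :=
  match missing with
  | [] => []
  | m :: rest =>
    let breaks := (missing.zip rest).filter (fun p => !(p.2 == p.1 + 1))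
    let starts := m :: breaks.map (·.2)
    let ends := breaks.map (·.1) ++ [missing.getLastD 0]   -- missing[-1]; list is nonempty here
    (starts.zip ends).map (fun p => pvFmt p.1 p.2)

-- ===== PRECONDITION & SPEC =====
def Spec_summarize_missing_blocks (missing : List Int) (out : List String) : Prop := out = summarize_missing_blocks_alt missing
instance (missing : List Int) (out : List String) : Decidable (Spec_summarize_missing_blocks missing out) := by unfold Spec_summarize_missing_blocks; infer_instance

-- ===== CLAIM (what is proved, stated in full; the proofs are below) =====
def Claim_equal_summarize_missing_blocks : Prop := ∀ (missing : List Int), Dom_summarize_missing_blocks missing → Spec_summarize_missing_blocks missing (summarize_missing_blocks missing)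

-- ===== LEMMAS AND PROOFS =====

-- reference: the formatted block list, as a structural recursion
def pvBlocks (start prev : Int) : List Int → List String
  | [] => [pvFmt start prev]
  | n :: rest => if n == prev + 1 then pvBlocks start n rest
                 else pvFmt start prev :: pvBlocks n n rest

theorem pvA_loop (rest : List Int) : ∀ (blocks : List String) (start prev : Int),
    (rest.foldl pvStepA (blocks, start, prev)).1
      ++ [pvFmt (rest.foldl pvStepA (blocks, start, prev)).2.1 (rest.foldl pvStepA (blocks, start, prev)).2.2]
    = blocks ++ pvBlocks start prev rest := by
  induction rest with
  | nil => intro blocks start prev; simp [pvBlocks]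
  | cons n rest ih =>
    intro blocks start prev
    by_cases h : n = prev + 1
    · simp [List.foldl, pvStepA, h, pvBlocks, ih]
    · have hstep : pvStepA (blocks, start, prev) n = (blocks ++ [pvFmt start prev], n, n) := by
        simp [pvStepA, pvFmt, h]
      simp only [List.foldl_cons, hstep]
      rw [ih]
      simp [pvBlocks, h]

theorem pvB_zip (rest : List Int) : ∀ (s p : Int),
    ((s :: (((p :: rest).zip rest).filter (fun q => !(q.2 == q.1 + 1))).map (·.2)).zip
      ((((p :: rest).zip rest).filter (fun q => !(q.2 == q.1 + 1))).map (·.1) ++ [(p :: rest).getLastD 0])).map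
      (fun q => pvFmt q.1 q.2) = pvBlocks s p rest := by
  induction rest with
  | nil => intro s p; simp [pvBlocks]
  | cons n rest ih =>
    intro s p
    by_cases h : n = p + 1
    · have := ih s n
      simpa [pvBlocks, h] using this
    · have := ih n n
      simp only [List.zip_cons_cons, List.filter_cons]
      simp only [show (!(n == p + 1)) = true by simp [h]]
      simp [pvBlocks, h] at this ⊢
      exact this

-- ===== VERDICT (by name: the statement is the Claim_ definition above) =====
theorem summarize_missing_blocks_spec : Claim_equal_summarize_missing_blocks := by
  intro missing _
  unfold Spec_summarize_missing_blocks
  match missing with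
  | [] => rfl
  | m :: rest =>
    have hA := pvA_loop rest [] m m
    have hB := pvB_zip rest m m
    simp only [List.nil_append] at hA
    show (List.foldl pvStepA ([], m, m) rest).1
        ++ [pvFmt (List.foldl pvStepA ([], m, m) rest).2.1 (List.foldl pvStepA ([], m, m) rest).2.2]
      = summarize_missing_blocks_alt (m :: rest)
    rw [hA]
    exact hB.symm
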